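-- pv_equiv track=rewrite | github.com/pypi-data/pypi-code-101 | plom/plom-0.7.5-py3-none-any.whl/plom/misc_utils.py | next_in_longest_subsequence
-- ===== SOURCE A (Python) =====
-- import string
--
-- def next_in_longest_subsequence(items):
--     """Guess next entry in the longest unordered contiguous subsequence.
--
--     args:
--         items (list): an unordered list of strings.
--
--     return:
--         str/None: the next item in a longest subsequence.
--
--     Examples:
--
--     >>> next_in_longest_subsequence(["(a)", "(b)"])
--     '(c)'
--
--     >>> next_in_longest_subsequence(["i.", "ii.", "iii."])
--     'iv.'
--
--     >>> next_in_longest_subsequence(["2", "1", "C", "(a)", "A", "B"])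
--     'D'
--
--
--     >>> next_in_longest_subsequence(["2", "b", "c", "Z", "foo"])
--
--     >>> next_in_longest_subsequence(["a.", "b)", "(c)"])
--     'b.'
--
--     Notes:
--       * Behaviour in a tie not well-defined; you'll get one of them.
--       * "(a), (b)" and "a., b." are different subsequences.
--       * The sequences should not be longer than the alphabet.  Overly
--         long sequences don't count, e.g., if you already have a-z, then
--         that subsequence cannot be extended:
--
--     >>> from string import ascii_lowercase
--     >>> next_in_longest_subsequence(["Q1", "Q2", *ascii_lowercase])
--     'Q3'
--     """
--     romans = ["i", "ii", "iii", "iv", "v", "vi", "vii", "viii", "ix", "x"]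
--     romans.extend(["x" + n for n in romans] + ["xx" + n for n in romans])
--     smallints = range(1, 31)
--
--     # Each sequence we search is an iterable who iterates are strings
--     # (caution: ascii_lowercase is a string not a list).
--     sequences = [
--         string.ascii_lowercase,
--         [f"{x}." for x in string.ascii_lowercase],
--         [f"{x})" for x in string.ascii_lowercase],
--         [f"({x})" for x in string.ascii_lowercase],
--         string.ascii_uppercase,
--         [f"{x}." for x in string.ascii_uppercase],
--         [f"{x})" for x in string.ascii_uppercase],
--         [f"({x})" for x in string.ascii_uppercase],
--         romans,
--         [f"{x}." for x in romans],
--         [f"{x})" for x in romans],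
--         [f"({x})" for x in romans],
--         [f"Q{x}" for x in smallints],
--         [f"{x}." for x in smallints],
--         [f"{x}" for x in smallints],
--     ]
--
--     counts = [0] * len(sequences)
--     for idx, seq in enumerate(sequences):
--         for count, x in enumerate(seq):
--             if x not in items:
--                 counts[idx] = count
--                 break
--
--     idx, n = max(enumerate(counts), key=lambda t: t[1])
--
--     if n > 0:
--         return sequences[idx][n]
--
--     return None
-- ===== SOURCE B (Python) =====
-- import string
--
--
-- def next_in_longest_subsequence(items):
--     """Guess next entry in the longest unordered contiguous subsequence.
--
--     Same result as the original, computed by level-synchronous elimination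
--     rounds instead of per-sequence counting + argmax: all sequences start
--     active; at round p each active sequence either survives (its p-th label
--     is among the items), drops out (that label is missing -- its matched
--     prefix length is exactly p), or is silently retired (p is past its end,
--     i.e. the entire sequence is present and cannot be extended).  The answer
--     is the p-th label of the first sequence dropped in the deepest round
--     p >= 1, or None if no round >= 1 dropped anything.
--     """
--     romans = ["i", "ii", "iii", "iv", "v", "vi", "vii", "viii", "ix", "x"]
--     romans.extend(["x" + n for n in romans] + ["xx" + n for n in romans])
--     smallints = range(1, 31)
--
--     sequences = [
--         string.ascii_lowercase,
--         [f"{x}." for x in string.ascii_lowercase],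
--         [f"{x})" for x in string.ascii_lowercase],
--         [f"({x})" for x in string.ascii_lowercase],
--         string.ascii_uppercase,
--         [f"{x}." for x in string.ascii_uppercase],
--         [f"{x})" for x in string.ascii_uppercase],
--         [f"({x})" for x in string.ascii_uppercase],
--         romans,
--         [f"{x}." for x in romans],
--         [f"{x})" for x in romans],
--         [f"({x})" for x in romans],
--         [f"Q{x}" for x in smallints],
--         [f"{x}." for x in smallints],
--         [f"{x}" for x in smallints],
--     ]
--
--     present = set(items)
--     active = list(range(len(sequences)))
--     best = None
--     p = 0
--     while active:
--         nxt = []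
--         dropped = []
--         for idx in active:
--             seq = sequences[idx]
--             if p >= len(seq):
--                 continue
--             if seq[p] in present:
--                 nxt.append(idx)
--             else:
--                 dropped.append(idx)
--         if dropped and p > 0:
--             best = (dropped[0], p)
--         active = nxt
--         p += 1
--
--     if best is None:
--         return None
--     idx, n = best
--     return sequences[idx][n]
-- ===== Notes on version B (the rewrite author's own statement) =====
-- stated objective: alternative
-- what changed: B replaces A's per-sequence prefix counting followed by argmax with level-synchronous elimination rounds over a set of the items: all sequences start active, round p keeps those whose p-th label is present, retires fully-present ones, and remembers the first sequence dropped in the deepest round p>=1; the answer is that sequence's p-th label (None if no round >= 1 drops anything).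
import Mathlib
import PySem

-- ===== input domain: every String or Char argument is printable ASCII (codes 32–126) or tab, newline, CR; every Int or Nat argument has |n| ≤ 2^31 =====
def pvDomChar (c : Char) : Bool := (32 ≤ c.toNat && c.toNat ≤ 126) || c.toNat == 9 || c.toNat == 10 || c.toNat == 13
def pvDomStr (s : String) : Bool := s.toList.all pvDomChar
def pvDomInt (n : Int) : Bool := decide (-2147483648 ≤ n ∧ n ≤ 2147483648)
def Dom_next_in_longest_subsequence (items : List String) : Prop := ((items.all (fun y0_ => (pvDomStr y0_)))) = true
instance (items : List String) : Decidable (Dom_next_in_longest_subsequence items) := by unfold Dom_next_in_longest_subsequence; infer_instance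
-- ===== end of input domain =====

-- B replaces A's per-sequence prefix counting + argmax by level-synchronous elimination
-- rounds over a set of the items (round p keeps the active sequences whose p-th label is
-- present and remembers the first sequence dropped in the deepest round p ≥ 1); same
-- return value, measurably faster on large item lists (set membership, one test per label).

-- ===== PORT A =====
-- module-level constant data both versions build identically: romans and the candidate sequences
def pvRomans : List String :=
  let base : List String := ["i", "ii", "iii", "iv", "v", "vi", "vii", "viii", "ix", "x"]
  base ++ (base.map (fun n => "x" ++ n) ++ base.map (fun n => "xx" ++ n))

def pvSeqData : List (List String) :=
  let lower : List String := "abcdefghijklmnopqrstuvwxyz".toList.map (fun c => String.mk [c])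
  let upper : List String := "ABCDEFGHIJKLMNOPQRSTUVWXYZ".toList.map (fun c => String.mk [c])
  let smallints : List Int := PySem.List.pyRange 1 31 1
  [ lower,
    lower.map (fun x => x ++ "."),
    lower.map (fun x => x ++ ")"),
    lower.map (fun x => "(" ++ x ++ ")"),
    upper,
    upper.map (fun x => x ++ "."),
    upper.map (fun x => x ++ ")"),
    upper.map (fun x => "(" ++ x ++ ")"),
    pvRomans,
    pvRomans.map (fun x => x ++ "."),
    pvRomans.map (fun x => x ++ ")"),
    pvRomans.map (fun x => "(" ++ x ++ ")"),
    smallints.map (fun x => "Q" ++ PySem.Int.toStr x),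
    smallints.map (fun x => PySem.Int.toStr x ++ "."),
    smallints.map (fun x => PySem.Int.toStr x) ]

-- A's inner loop: 'for count, x in enumerate(seq): if x not in items: <count>; break'
def pvInnerA (items : List String) : List String → Int → Option Int
  | [], _ => none
  | x :: rest, c => if items.contains x then pvInnerA items rest (c + 1) else some c

-- A's outer loop: 'for idx, seq in enumerate(sequences): … counts[idx] = count'
def pvLoopA (items : List String) : List (List String) → Nat → List Int → List Int
  | [], _, counts => counts
  | seq :: rest, idx, counts =>
      pvLoopA items rest (idx + 1)
        (match pvInnerA items seq 0 with
         | some c => counts.set idx c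
         | none => counts)

-- A's tail: 'idx, n = max(enumerate(counts), key=...); if n > 0: return sequences[idx][n]; return None'
def pvPickA (counts : List Int) : Option String :=
  match PySem.List.max? (PySem.List.enumerate counts 0) (fun t => t.2) with
  | some (idx, n) =>
      if n > 0 then (PySem.List.pyGet? pvSeqData idx).bind (fun s => PySem.List.pyGet? s n)
      else none
  | none => none

def next_in_longest_subsequence (items : List String) : Option String :=
  pvPickA (pvLoopA items pvSeqData 0 (List.replicate pvSeqData.length 0))

-- ===== PORT B =====
-- one elimination round: split the active sequence indices into the survivors (p-th label
-- present) and the dropped (p-th label missing); fully-present sequences retire silently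
def pvRound (present : PySem.Set String) (p : Nat) (active : List Nat) : List Nat × List Nat :=
  active.foldl
    (fun acc idx =>
      match (pvSeqData.getD idx [])[p]? with
      | none => acc
      | some x =>
          if PySem.Set.contains present x then (acc.1 ++ [idx], acc.2) else (acc.1, acc.2 ++ [idx]))
    ([], [])

-- 'while active: … p += 1' (fuel is a totality guard only: round 30 retires every sequence)
def pvLoopB (present : PySem.Set String) :
    Nat → List Nat → Nat → Option (Nat × Nat) → Option (Nat × Nat)
  | 0, _, _, best => best
  | fuel + 1, active, p, best =>
      if active.isEmpty then best
      else
        let r := pvRound present p active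
        pvLoopB present fuel r.1 (p + 1)
          (match r.2.head? with
           | some i => if 0 < p then some (i, p) else best
           | none => best)

def next_in_longest_subsequence_alt (items : List String) : Option String :=
  let present := PySem.Set.ofList items
  match pvLoopB present 32 (List.range pvSeqData.length) 0 none with
  | none => none
  | some (idx, n) =>
      (PySem.List.pyGet? pvSeqData (idx : Int)).bind (fun s => PySem.List.pyGet? s (n : Int))

-- ===== PRECONDITION & SPEC =====
def Spec_next_in_longest_subsequence (items : List String) (out : Option String) : Prop := out = next_in_longest_subsequence_alt items
instance (items : List String) (out : Option String) : Decidable (Spec_next_in_longest_subsequence items out) := by unfold Spec_next_in_longest_subsequence; infer_instance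

-- ===== CLAIM (what is proved, stated in full; the proofs are below) =====
def Claim_equal_next_in_longest_subsequence : Prop := ∀ (items : List String), Dom_next_in_longest_subsequence items → Spec_next_in_longest_subsequence items (next_in_longest_subsequence items)

-- ===== LEMMAS AND PROOFS =====

-- ---- A-side: the counts list is a map of first-missing-position over the sequences ----

-- value written at position idx by A's outer loop (0 if the inner loop never broke)
def pvFA (items : List String) (seq : List String) : Int :=
  match pvInnerA items seq 0 with
  | some v => v
  | none => 0

def pvCounts (items : List String) : List Int := pvSeqData.map (pvFA items)

theorem pv_set_append (pre : List Int) (x v : Int) (t : List Int) :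
    (pre ++ x :: t).set pre.length v = pre ++ v :: t := by
  induction pre with
  | nil => rfl
  | cons a pre ih => simpa [List.set] using ih

theorem pvLoopA_eq_map (items : List String) :
    ∀ (seqs : List (List String)) (pre : List Int),
      pvLoopA items seqs pre.length (pre ++ List.replicate seqs.length 0)
        = pre ++ seqs.map (pvFA items) := by
  intro seqs
  induction seqs with
  | nil => intro pre; simp [pvLoopA]
  | cons seq rest ih =>
    intro pre
    cases h : pvInnerA items seq 0 with
    | none =>
      have h0 : pvFA items seq = 0 := by simp [pvFA, h]
      simp only [pvLoopA, h, List.length_cons, List.replicate_succ]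
      have e1 : pre ++ (0 : Int) :: List.replicate rest.length 0
          = (pre ++ [(0 : Int)]) ++ List.replicate rest.length 0 := by simp
      have e2 : pre.length + 1 = (pre ++ [(0 : Int)]).length := by simp
      rw [e1, e2, ih]
      simp [h0]
    | some c =>
      have h0 : pvFA items seq = c := by simp [pvFA, h]
      simp only [pvLoopA, h, List.length_cons, List.replicate_succ]
      have e1 : (pre ++ (0 : Int) :: List.replicate rest.length 0).set pre.length c
          = (pre ++ [c]) ++ List.replicate rest.length 0 := by
        rw [pv_set_append]; simp
      have e2 : pre.length + 1 = (pre ++ [c]).length := by simp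
      rw [e1, e2, ih]
      simp [h0]

-- the inner loop is findIdx? of the first label missing from items
theorem pv_innerA_eq_findIdx? (items : List String) :
    ∀ (seq : List String) (c : Int),
      pvInnerA items seq c
        = (List.findIdx? (fun x => !items.contains x) seq).map (fun (k : Nat) => c + (k : Int)) := by
  intro seq
  induction seq with
  | nil => intro c; simp [pvInnerA]
  | cons x rest ih =>
    intro c
    rw [List.findIdx?_cons]
    by_cases h : items.contains x
    · rw [pvInnerA, if_pos h, ih (c + 1)]
      simp only [h, Bool.not_true, if_neg (by simp : ¬(false = true))]
      cases hf : List.findIdx? (fun x => !items.contains x) rest with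
      | none => simp
      | some k =>
        simp only [Option.map_some, Option.some.injEq]
        push_cast
        ring
    · rw [pvInnerA, if_neg h]
      have hx : x ∉ items := by simpa using h
      simp [hx]

-- ---- A-side: the max(enumerate(..), key=..) / index analysis (first index of the max) ----

-- 'if n>0: sequences[first index with counts = max n][n] else None'
def pvArgmax (counts : List Int) : Option String :=
  match PySem.List.max? counts (fun x => x) with
  | none => none
  | some n =>
      if n > 0 then
        match PySem.List.index? counts n with
        | some j => (PySem.List.pyGet? pvSeqData (j : Int)).bind (fun s => PySem.List.pyGet? s n)
        | none => none
      else none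

theorem pvMaxGo (l : List Int) :
    ∀ (s : Int) (bi bv : Int),
      List.foldl
        (fun (acc : Option (Int × Int)) (x : Int × Int) =>
          match acc with
          | none => some x
          | some m => if m.2 < x.2 then some x else some m)
        (some (bi, bv)) (PySem.List.enumerate l s)
      = if ∀ x ∈ l, x ≤ bv then some (bi, bv)
        else some (s + (((PySem.List.index? l (l.foldl max bv)).getD 0 : Nat) : Int), l.foldl max bv) := by
  induction l with
  | nil => intro s bi bv; simp [PySem.List.enumerate_nil]
  | cons c r ih =>
    intro s bi bv
    rw [PySem.List.enumerate_cons, List.foldl_cons]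
    show List.foldl _ (if bv < c then some (s, c) else some (bi, bv)) (PySem.List.enumerate r (s + 1)) = _
    by_cases hbc : bv < c
    · rw [if_pos hbc, ih (s + 1) s c]
      by_cases hall : ∀ x ∈ r, x ≤ c
      · rw [if_pos hall, if_neg (by push_neg; exact ⟨c, List.mem_cons_self, hbc⟩)]
        have hm : (c :: r).foldl max bv = c := by
          rw [List.foldl_cons, max_eq_right hbc.le]
          rcases PySem.List.foldl_max_mem r c with h | h
          · exact h
          · exact le_antisymm (hall _ h) (PySem.List.le_foldl_max r c).1
        rw [hm, PySem.List.index?_cons_self]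
        simp
      · rw [if_neg hall, if_neg (by push_neg; exact ⟨c, List.mem_cons_self, hbc⟩)]
        push_neg at hall
        obtain ⟨y, hy, hcy⟩ := hall
        have hm' : c < r.foldl max c := lt_of_lt_of_le hcy ((PySem.List.le_foldl_max r c).2 y hy)
        have hmem : r.foldl max c ∈ r := by
          rcases PySem.List.foldl_max_mem r c with h | h
          · omega
          · exact h
        have hm : (c :: r).foldl max bv = r.foldl max c := by
          rw [List.foldl_cons, max_eq_right hbc.le]
        rw [hm]
        obtain ⟨j, hj⟩ := Option.isSome_iff_exists.mp ((PySem.List.index?_isSome_iff _ _).mpr hmem)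
        rw [PySem.List.index?_cons_of_ne _ (by omega : c ≠ r.foldl max c), hj]
        simp only [Option.map_some, Option.getD_some]
        congr 1
        push_cast
        ring_nf
    · rw [if_neg hbc, ih (s + 1) bi bv]
      by_cases hall : ∀ x ∈ r, x ≤ bv
      · have hcr : ∀ x ∈ c :: r, x ≤ bv := by
          intro x hx
          rcases List.mem_cons.mp hx with rfl | h
          · omega
          · exact hall x h
        rw [if_pos hall, if_pos hcr]
      · rw [if_neg hall, if_neg (by intro h; exact hall (fun x hx => h x (List.mem_cons_of_mem _ hx)))]
        push_neg at hall
        obtain ⟨y, hy, hcy⟩ := hall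
        have hm' : bv < r.foldl max bv := lt_of_lt_of_le hcy ((PySem.List.le_foldl_max r bv).2 y hy)
        have hmem : r.foldl max bv ∈ r := by
          rcases PySem.List.foldl_max_mem r bv with h | h
          · omega
          · exact h
        have hm : (c :: r).foldl max bv = r.foldl max bv := by
          rw [List.foldl_cons, max_eq_left (by omega)]
        rw [hm]
        obtain ⟨j, hj⟩ := Option.isSome_iff_exists.mp ((PySem.List.index?_isSome_iff _ _).mpr hmem)
        rw [PySem.List.index?_cons_of_ne _ (by omega : c ≠ r.foldl max bv), hj]
        simp only [Option.map_some, Option.getD_some]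
        congr 1
        push_cast
        ring_nf

theorem pvMaxEnum (c0 : Int) (t : List Int) :
    PySem.List.max? (PySem.List.enumerate (c0 :: t) 0) (fun p => p.2)
    = if ∀ x ∈ t, x ≤ c0 then some ((0 : Int), c0)
      else some (1 + (((PySem.List.index? t (t.foldl max c0)).getD 0 : Nat) : Int), t.foldl max c0) := by
  unfold PySem.List.max?
  rw [PySem.List.enumerate_cons, List.foldl_cons]
  norm_num
  trans (List.foldl
      (fun (acc : Option (Int × Int)) (x : Int × Int) =>
        match acc with
        | none => some x
        | some m => if m.2 < x.2 then some x else some m)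
      (some ((0 : Int), c0)) (PySem.List.enumerate t 1))
  · apply PySem.List.foldl_congr_mem
    intro acc x _
    cases acc <;> rfl
  · rw [pvMaxGo t 1 0 c0]
    simp [PySem.List.index?_eq_idxOf?]

theorem pv_pickA_eq_argmax (c0 : Int) (t : List Int) :
    pvPickA (c0 :: t) = pvArgmax (c0 :: t) := by
  unfold pvPickA pvArgmax
  rw [pvMaxEnum, PySem.List.max?_id_cons]
  by_cases hall : ∀ x ∈ t, x ≤ c0
  · rw [if_pos hall]
    have hm : t.foldl max c0 = c0 := by
      rcases PySem.List.foldl_max_mem t c0 with h | h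
      · exact h
      · exact le_antisymm (hall _ h) (PySem.List.le_foldl_max t c0).1
    rw [hm]
    show (if c0 > 0 then (PySem.List.pyGet? pvSeqData 0).bind (fun s => PySem.List.pyGet? s c0) else none)
      = (if c0 > 0 then
           match PySem.List.index? (c0 :: t) c0 with
           | some j => (PySem.List.pyGet? pvSeqData (j : Int)).bind (fun s => PySem.List.pyGet? s c0)
           | none => none
         else none)
    rw [PySem.List.index?_cons_self]
    norm_num
  · rw [if_neg hall]
    push_neg at hall
    obtain ⟨y, hy, hcy⟩ := hall
    have hm' : c0 < t.foldl max c0 := lt_of_lt_of_le hcy ((PySem.List.le_foldl_max t c0).2 y hy)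
    have hmem : t.foldl max c0 ∈ t := by
      rcases PySem.List.foldl_max_mem t c0 with h | h
      · omega
      · exact h
    obtain ⟨j, hj⟩ := Option.isSome_iff_exists.mp ((PySem.List.index?_isSome_iff _ _).mpr hmem)
    rw [hj]
    simp only [Option.getD_some]
    rw [PySem.List.index?_cons_of_ne _ (by omega : c0 ≠ t.foldl max c0), hj]
    simp only [Option.map_some]
    show (if t.foldl max c0 > 0 then
            (PySem.List.pyGet? pvSeqData (1 + (j : Int))).bind (fun s => PySem.List.pyGet? s (t.foldl max c0))
          else none)
       = (if t.foldl max c0 > 0 then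
            (PySem.List.pyGet? pvSeqData (((j + 1 : Nat) : Int))).bind (fun s => PySem.List.pyGet? s (t.foldl max c0))
          else none)
    have hc : ((j + 1 : Nat) : Int) = 1 + (j : Int) := by push_cast; ring
    rw [hc]

-- ---- B-side: what one elimination round and the whole loop compute ----

-- first missing position of sequence i (none = the whole sequence is present)
def pvF (items : List String) (i : Nat) : Option Nat :=
  List.findIdx? (fun x => !items.contains x) (pvSeqData.getD i [])

def pvGo (items : List String) (p i : Nat) : Bool :=
  match (pvSeqData.getD i [])[p]? with
  | some x => items.contains x
  | none => false

def pvDr (items : List String) (p i : Nat) : Bool :=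
  match (pvSeqData.getD i [])[p]? with
  | some x => !items.contains x
  | none => false

-- sequence i is still active at round p
def pvSurv (items : List String) (p i : Nat) : Bool :=
  ((pvSeqData.getD i []).take p).all (fun x => items.contains x)
    && decide (p ≤ (pvSeqData.getD i []).length)

-- the sequences dropped in round q, in index order
def pvDrop (items : List String) (q : Nat) : List Nat :=
  (List.range pvSeqData.length).filter (fun i => pvF items i == some q)

def pvP (items : List String) (q : Nat) : Bool :=
  decide (0 < q) && !(pvDrop items q).isEmpty

-- one best-update of the loop, as a function of the round number
def pvUpd (items : List String) (b : Option (Nat × Nat)) (q : Nat) : Option (Nat × Nat) :=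
  if pvP items q then some ((pvDrop items q).headD 0, q) else b

theorem pv_contains (items : List String) (x : String) :
    PySem.Set.contains (PySem.Set.ofList items) x = items.contains x := by
  rw [Bool.eq_iff_iff]
  simp [PySem.Set.contains_iff, PySem.Set.mem_ofList, List.contains_iff_mem]

theorem pv_surv_iff (items : List String) (p i : Nat) :
    pvSurv items p i = true
      ↔ (p ≤ (pvSeqData.getD i []).length
          ∧ ∀ (j : Nat) (hj : j < p) (h : j < (pvSeqData.getD i []).length),
              items.contains ((pvSeqData.getD i [])[j]) = true) := by
  unfold pvSurv
  rw [Bool.and_eq_true, List.all_eq_true, decide_eq_true_iff]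
  constructor
  · rintro ⟨hall, hlen⟩
    refine ⟨hlen, fun j hj h => hall _ ?_⟩
    exact List.mem_take_iff_getElem.mpr ⟨j, by omega, rfl⟩
  · rintro ⟨hlen, hall⟩
    refine ⟨fun x hx => ?_, hlen⟩
    obtain ⟨j, hj, rfl⟩ := List.mem_take_iff_getElem.mp hx
    exact hall j (by omega) (by omega)

theorem pv_F_lt (items : List String) {q i : Nat} (h : pvF items i = some q) :
    q < (pvSeqData.getD i []).length := by
  unfold pvF at h
  exact (List.findIdx?_eq_some_iff_getElem.mp h).1

theorem pv_surv_step (items : List String) (p i : Nat) :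
    (pvSurv items p i && pvGo items p i) = pvSurv items (p + 1) i := by
  cases h : (pvSeqData.getD i [])[p]? with
  | none =>
    have hg : pvGo items p i = false := by unfold pvGo; rw [h]
    have hlen : (pvSeqData.getD i []).length <= p := by
      simpa using List.getElem?_eq_none_iff.mp h
    have hs : pvSurv items (p + 1) i = false := by
      rw [Bool.eq_false_iff]
      intro hcon
      have := ((pv_surv_iff items (p + 1) i).mp hcon).1
      omega
    rw [hg, hs, Bool.and_false]
  | some x =>
    have hlt : p < (pvSeqData.getD i []).length := (List.getElem?_eq_some_iff.mp h).1
    have hx : (pvSeqData.getD i [])[p]'hlt = x := (List.getElem?_eq_some_iff.mp h).2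
    have hgo : pvGo items p i = items.contains x := by unfold pvGo; rw [h]
    rw [hgo, Bool.eq_iff_iff, Bool.and_eq_true, pv_surv_iff, pv_surv_iff]
    constructor
    · rintro ⟨⟨-, hall⟩, hcx⟩
      refine ⟨by omega, fun j hj hjl => ?_⟩
      rcases Nat.lt_or_ge j p with hjp | hjp
      · exact hall j hjp hjl
      · have hjp' : j = p := by omega
        subst hjp'
        rw [hx]
        exact hcx
    · rintro ⟨hlen', hall⟩
      exact ⟨⟨by omega, fun j hj hjl => hall j (by omega) hjl⟩,
        by rw [← hx]; exact hall p (by omega) hlt⟩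

theorem pv_drop_eq (items : List String) (p i : Nat) :
    (pvSurv items p i && pvDr items p i) = (pvF items i == some p) := by
  cases h : (pvSeqData.getD i [])[p]? with
  | none =>
    have hd : pvDr items p i = false := by unfold pvDr; rw [h]
    have hlen : (pvSeqData.getD i []).length <= p := by
      simpa using List.getElem?_eq_none_iff.mp h
    have hF : (pvF items i == some p) = false := by
      rw [Bool.eq_false_iff]
      intro hcon
      have := pv_F_lt items (eq_of_beq hcon)
      omega
    rw [hd, hF, Bool.and_false]
  | some x =>
    have hlt : p < (pvSeqData.getD i []).length := (List.getElem?_eq_some_iff.mp h).1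
    have hx : (pvSeqData.getD i [])[p]'hlt = x := (List.getElem?_eq_some_iff.mp h).2
    have hd : pvDr items p i = !items.contains x := by unfold pvDr; rw [h]
    rw [hd, Bool.eq_iff_iff, Bool.and_eq_true, pv_surv_iff, beq_iff_eq]
    unfold pvF
    rw [List.findIdx?_eq_some_iff_getElem]
    constructor
    · rintro ⟨⟨-, hall⟩, hnx⟩
      refine ⟨hlt, by rw [hx]; exact hnx, fun j hj => ?_⟩
      simpa using hall j hj (by omega)
    · rintro ⟨hlt2, hnx, hall⟩
      refine ⟨⟨by omega, fun j hj hjl => ?_⟩, ?_⟩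
      · have hjj := hall j hj
        simpa using hjj
      · rw [hx] at hnx
        exact hnx

theorem pv_surv_of_F (items : List String) {p q i : Nat} (hpq : p ≤ q)
    (h : pvF items i = some q) : pvSurv items p i = true := by
  unfold pvF at h
  obtain ⟨hlt, -, hall⟩ := List.findIdx?_eq_some_iff_getElem.mp h
  rw [pv_surv_iff]
  refine ⟨by omega, fun j hj hjl => ?_⟩
  have := hall j (by omega)
  simpa using this

theorem pv_len_le (i : Nat) : (pvSeqData.getD i []).length ≤ 30 := by
  by_cases h : i < pvSeqData.length
  · have hAll : ∀ j ∈ List.range pvSeqData.length, (pvSeqData.getD j []).length ≤ 30 := by decide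
    exact hAll i (List.mem_range.mpr h)
  · rw [List.getD_eq_default _ _ (by omega)]
    simp

theorem pv_round_eq (items : List String) (p : Nat) :
    ∀ (l a b : List Nat),
      List.foldl
        (fun (acc : List Nat × List Nat) idx =>
          match (pvSeqData.getD idx [])[p]? with
          | none => acc
          | some x =>
              if PySem.Set.contains (PySem.Set.ofList items) x then (acc.1 ++ [idx], acc.2)
              else (acc.1, acc.2 ++ [idx]))
        (a, b) l
      = (a ++ l.filter (pvGo items p), b ++ l.filter (pvDr items p)) := by
  intro l
  induction l with
  | nil => intro a b; simp
  | cons idx rest ih =>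
    intro a b
    rw [List.foldl_cons]
    cases h : (pvSeqData.getD idx [])[p]? with
    | none =>
      have hg : pvGo items p idx = false := by unfold pvGo; rw [h]
      have hd : pvDr items p idx = false := by unfold pvDr; rw [h]
      simp only [h]
      rw [ih a b]
      simp [List.filter_cons, hg, hd]
    | some x =>
      simp only [h]
      cases hc : items.contains x
      · have hg : pvGo items p idx = false := by
          unfold pvGo; rw [h]; show items.contains x = false; exact hc
        have hd : pvDr items p idx = true := by
          unfold pvDr; rw [h]; show (!items.contains x) = true; rw [hc]; rfl
        rw [if_neg (by rw [pv_contains, hc]; simp)]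
        rw [ih]
        simp [List.filter_cons, hg, hd]
      · have hg : pvGo items p idx = true := by
          unfold pvGo; rw [h]; show items.contains x = true; exact hc
        have hd : pvDr items p idx = false := by
          unfold pvDr; rw [h]; show (!items.contains x) = false; rw [hc]; rfl
        rw [if_pos (by rw [pv_contains, hc])]
        rw [ih]
        simp [List.filter_cons, hg, hd]

theorem pv_foldl_id {α β : Type} (f : α → β → α) :
    ∀ (l : List β) (b : α), (∀ q ∈ l, ∀ x, f x q = x) → l.foldl f b = b := by
  intro l
  induction l with
  | nil => intro b _; rfl
  | cons q rest ih =>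
    intro b h
    rw [List.foldl_cons, h q List.mem_cons_self b]
    exact ih b (fun q' hq' => h q' (List.mem_cons_of_mem _ hq'))

-- the elimination loop, from round p onwards, is a fold of best-updates over rounds p..30
theorem pv_loopB_eq (items : List String) :
    ∀ (fuel : Nat) (p : Nat) (b : Option (Nat × Nat)), 31 ≤ p + fuel →
      pvLoopB (PySem.Set.ofList items) fuel
          ((List.range pvSeqData.length).filter (pvSurv items p)) p b
        = (List.range' p (31 - p)).foldl (pvUpd items) b := by
  intro fuel
  induction fuel with
  | zero =>
    intro p b hp
    have : 31 - p = 0 := by omega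
    rw [this]
    rfl
  | succ fuel ih =>
    intro p b hp
    by_cases hA : (List.range pvSeqData.length).filter (pvSurv items p) = []
    · rw [pvLoopB, if_pos (by simp [hA])]
      have hnone : ∀ q ∈ List.range' p (31 - p), ∀ x, pvUpd items x q = x := by
        intro q hq x
        have hpq : p ≤ q := (List.mem_range'_1.mp hq).1
        unfold pvUpd pvP
        have hdq : pvDrop items q = [] := by
          by_contra hne
          obtain ⟨i, hi⟩ := List.exists_mem_of_ne_nil _ hne
          have hmem := List.mem_filter.mp hi
          have hFi : pvF items i = some q := by simpa using hmem.2
          have hs : pvSurv items p i = true := pv_surv_of_F items hpq hFi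
          have : i ∈ (List.range pvSeqData.length).filter (pvSurv items p) :=
            List.mem_filter.mpr ⟨hmem.1, hs⟩
          rw [hA] at this
          exact absurd this (List.not_mem_nil)
        rw [hdq]
        simp
      exact (pv_foldl_id _ _ b hnone).symm
    · have hplt : p < 31 := by
        by_contra hge
        apply hA
        rw [List.filter_eq_nil_iff]
        intro i _
        intro hs
        have := (pv_surv_iff items p i).mp hs
        have := pv_len_le i
        omega
      rw [pvLoopB, if_neg (by simp [hA])]
      show pvLoopB (PySem.Set.ofList items) fuel
          (pvRound (PySem.Set.ofList items) p ((List.range pvSeqData.length).filter (pvSurv items p))).1 (p + 1)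
          (match (pvRound (PySem.Set.ofList items) p ((List.range pvSeqData.length).filter (pvSurv items p))).2.head? with
           | some i => if 0 < p then some (i, p) else b
           | none => b) = _
      have hres : pvRound (PySem.Set.ofList items) p
            ((List.range pvSeqData.length).filter (pvSurv items p))
          = ((List.range pvSeqData.length).filter (pvSurv items (p + 1)), pvDrop items p) := by
        unfold pvRound
        rw [pv_round_eq items p _ [] [], List.nil_append, List.nil_append,
            List.filter_filter, List.filter_filter]
        rw [Prod.mk.injEq]
        constructor
        · exact List.filter_congr (fun i _ => by rw [Bool.and_comm, pv_surv_step])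
        · exact List.filter_congr (fun i _ => by rw [Bool.and_comm, pv_drop_eq])
      rw [hres]
      have hbest : (match (pvDrop items p).head? with
           | some i => if 0 < p then some (i, p) else b
           | none => b) = pvUpd items b p := by
        cases hh : (pvDrop items p).head? with
        | none =>
          have hnil : pvDrop items p = [] := List.head?_eq_none_iff.mp hh
          simp [pvUpd, pvP, hnil]
        | some i =>
          obtain ⟨t, ht⟩ := List.head?_eq_some_iff.mp hh
          by_cases hp0 : 0 < p
          · simp [pvUpd, pvP, ht, hp0]
          · simp [pvUpd, pvP, hp0, Nat.le_zero.mp (Nat.not_lt.mp hp0)]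
      rw [hbest, ih (p + 1) (pvUpd items b p) (by omega)]
      have hr : List.range' p (31 - p) = p :: List.range' (p + 1) (31 - (p + 1)) := by
        have h31 : 31 - p = (31 - (p + 1)) + 1 := by omega
        rw [h31, List.range'_succ]
      rw [hr, List.foldl_cons]

-- a fold that overwrites its accumulator keeps the LAST qualifying element
theorem pv_foldl_overwrite {α : Type} (P : Nat → Bool) (f : Nat → α) (l : List Nat) :
    ∀ (b : Option α),
      l.foldl (fun b q => if P q then some (f q) else b) b
      = match (l.filter P).getLast? with
        | some q => some (f q)
        | none => b := by
  induction l using List.reverseRecOn with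
  | nil => intro b; simp
  | append_singleton l q ih =>
    intro b
    rw [List.foldl_append, List.foldl_cons, List.foldl_nil, List.filter_append]
    by_cases h : P q = true
    · rw [if_pos h]
      have : List.filter P [q] = [q] := by simp [h]
      rw [this, List.getLast?_concat]
    · rw [if_neg h]
      have : List.filter P [q] = [] := by simp [h]
      rw [this, List.append_nil]
      exact ih b

-- in a strictly increasing list every element is at most the last one
theorem pv_getLast_max :
    ∀ (l : List Nat), l.Pairwise (· < ·) → ∀ a, l.getLast? = some a → ∀ x ∈ l, x ≤ a := by
  intro l
  induction l with
  | nil => intro _ a _ x hx; exact absurd hx (List.not_mem_nil)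
  | cons c r ih =>
    intro hp a hl x hx
    cases r with
    | nil =>
      have hca : c = a := by simpa using hl
      have hxc : x = c := by simpa using hx
      omega
    | cons d s =>
      rw [List.getLast?_cons_cons] at hl
      rcases List.mem_cons.mp hx with rfl | hxr
      · have ha : a ∈ d :: s := List.mem_of_getLast? hl
        exact le_of_lt ((List.pairwise_cons.mp hp).1 a ha)
      · exact ih (List.pairwise_cons.mp hp).2 a hl x hxr

-- 'counts.index(v)' is the head of the index-filter over range
theorem pv_head_filter_index (l : List Int) (v : Int) :
    ((List.range l.length).filter (fun i => l[i]? == some v)).head? = PySem.List.index? l v := by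
  induction l with
  | nil => rw [PySem.List.index?_eq_idxOf?]; simp
  | cons a t ih =>
    rw [List.length_cons, List.range_succ_eq_map, List.filter_cons]
    by_cases hav : a = v
    · subst hav
      rw [if_pos (by simp), List.head?_cons, PySem.List.index?_cons_self]
    · rw [if_neg (by simp [hav]), List.filter_map]
      have hcomp : ((fun i => (a :: t)[i]? == some v) ∘ Nat.succ) = (fun i => t[i]? == some v) := by
        funext i
        simp
      rw [hcomp, List.head?_map, ih, PySem.List.index?_cons_of_ne _ hav]

theorem pv_FA_eq (items : List String) (i : Nat) (hi : i < pvSeqData.length) :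
    pvFA items (pvSeqData[i])
      = (match pvF items i with | some k => (k : Int) | none => 0) := by
  unfold pvFA pvF
  rw [pv_innerA_eq_findIdx?, List.getD_eq_getElem _ _ hi]
  cases h : List.findIdx? (fun x => !items.contains x) (pvSeqData[i]) with
  | none => simp [h]
  | some k => simp [h]

theorem pv_counts_getElem? (items : List String) {i : Nat} (hi : i < pvSeqData.length) :
    (pvCounts items)[i]?
      = some (match pvF items i with | some k => (k : Int) | none => 0) := by
  unfold pvCounts
  rw [List.getElem?_map, List.getElem?_eq_getElem hi]
  simp only [Option.map_some]
  rw [pv_FA_eq items i hi]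

-- every value in the counts list is 0 or a positive drop level k < 31 with pvP k
theorem pv_counts_bound (items : List String) {y : Int} (hy : y ∈ pvCounts items) :
    y = 0 ∨ ∃ k : Nat, y = (k : Int) ∧ 0 < k ∧ k < 31 ∧ pvP items k = true := by
  unfold pvCounts at hy
  obtain ⟨s, hs, hval⟩ := List.mem_map.mp hy
  obtain ⟨i, hi, hsi⟩ := List.mem_iff_getElem.mp hs
  subst hsi
  rw [pv_FA_eq items i hi] at hval
  cases hF : pvF items i with
  | none => left; rw [hF] at hval; exact hval.symm
  | some k =>
    rw [hF] at hval
    rcases Nat.eq_zero_or_pos k with rfl | hk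
    · left; simpa using hval.symm
    · right
      have hy' : y = (k : Int) := by rw [← hval]
      have h31 : k < 31 := by
        have h1 := pv_F_lt items hF
        have h2 := pv_len_le i
        omega
      have hP : pvP items k = true := by
        unfold pvP
        have hmem : i ∈ pvDrop items k :=
          List.mem_filter.mpr ⟨List.mem_range.mpr hi, by simp [hF]⟩
        have hne : pvDrop items k ≠ [] := List.ne_nil_of_mem hmem
        simp [hne, hk]
      exact ⟨k, hy', hk, h31, hP⟩

-- the level fold and A's max/index tail pick the same sequence element
theorem pv_bridge (items : List String) :
    pvArgmax (pvCounts items)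
      = match (List.range' 0 31).foldl (pvUpd items) none with
        | none => none
        | some (idx, n) =>
            (PySem.List.pyGet? pvSeqData (idx : Int)).bind (fun s => PySem.List.pyGet? s (n : Int)) := by
  have hfold : (List.range' 0 31).foldl (pvUpd items) none
      = match ((List.range' 0 31).filter (pvP items)).getLast? with
        | some q => some ((pvDrop items q).headD 0, q)
        | none => none := by
    unfold pvUpd
    exact pv_foldl_overwrite (pvP items) (fun q => ((pvDrop items q).headD 0, q)) _ none
  rw [hfold]
  rcases hc : pvCounts items with _ | ⟨c0, t⟩
  · exfalso
    have : pvSeqData = [] := by simpa [pvCounts] using hc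
    exact absurd this (by decide)
  cases hL : ((List.range' 0 31).filter (pvP items)).getLast? with
  | none =>
    have hfe : (List.range' 0 31).filter (pvP items) = [] := List.getLast?_eq_none_iff.mp hL
    have hzero : ∀ y ∈ pvCounts items, y = 0 := by
      intro y hy
      rcases pv_counts_bound items hy with h0 | ⟨k, hk, hk0, hk31, hkP⟩
      · exact h0
      · exfalso
        have hmem : k ∈ (List.range' 0 31).filter (pvP items) :=
          List.mem_filter.mpr ⟨List.mem_range'_1.mpr ⟨Nat.zero_le _, by omega⟩, hkP⟩
        rw [hfe] at hmem
        exact absurd hmem (List.not_mem_nil)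
    rw [hc] at hzero
    have hm : t.foldl max c0 = 0 := by
      rcases PySem.List.foldl_max_mem t c0 with h | h
      · rw [h]; exact hzero c0 List.mem_cons_self
      · exact hzero _ (List.mem_cons_of_mem _ h)
    unfold pvArgmax
    rw [PySem.List.max?_id_cons, hm]
    norm_num
  | some q =>
    have hqf : q ∈ (List.range' 0 31).filter (pvP items) := List.mem_of_getLast? hL
    obtain ⟨hqr, hqP⟩ := List.mem_filter.mp hqf
    have hq0 : 0 < q := by
      have := (Bool.and_eq_true _ _).mp hqP
      exact of_decide_eq_true this.1
    rcases hdrop : pvDrop items q with _ | ⟨i0, dt⟩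
    · exfalso
      unfold pvP at hqP
      rw [hdrop] at hqP
      simp at hqP
    have hi0 : i0 ∈ pvDrop items q := by rw [hdrop]; exact List.mem_cons_self
    obtain ⟨hi0r, hi0F⟩ := List.mem_filter.mp hi0
    have hi0N : i0 < pvSeqData.length := List.mem_range.mp hi0r
    have hi0F' : pvF items i0 = some q := by simpa using hi0F
    -- (q : Int) occurs in the counts list, at index i0
    have hqc : ((q : Int)) ∈ pvCounts items := by
      have := pv_counts_getElem? items hi0N
      rw [hi0F'] at this
      exact List.mem_of_getElem? this
    -- every count is at most q
    have hub : ∀ y ∈ pvCounts items, y ≤ (q : Int) := by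
      intro y hy
      rcases pv_counts_bound items hy with h0 | ⟨k, hk, hk0, hk31, hkP⟩
      · rw [h0]; positivity
      · have hmem : k ∈ (List.range' 0 31).filter (pvP items) :=
          List.mem_filter.mpr ⟨List.mem_range'_1.mpr ⟨Nat.zero_le _, by omega⟩, hkP⟩
        have hle : k ≤ q :=
          pv_getLast_max _ ((List.pairwise_lt_range' 1).filter _) q hL k hmem
        rw [hk]
        exact_mod_cast hle
    -- hence the max of the counts is exactly q
    have hmax : t.foldl max c0 = (q : Int) := by
      apply le_antisymm
      · rcases PySem.List.foldl_max_mem t c0 with h | h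
        · rw [h]; exact hub c0 (hc ▸ List.mem_cons_self)
        · exact hub _ (hc ▸ List.mem_cons_of_mem _ h)
      · rw [hc] at hqc
        rcases List.mem_cons.mp hqc with h | h
        · rw [h]; exact (PySem.List.le_foldl_max t c0).1
        · exact (PySem.List.le_foldl_max t c0).2 _ h
    -- and the first index attaining it is i0, the head of this round's droppers
    have hidx : PySem.List.index? (pvCounts items) ((q : Int)) = some i0 := by
      rw [← pv_head_filter_index]
      have hlen : (pvCounts items).length = pvSeqData.length := by
        unfold pvCounts; exact List.length_map _
      rw [hlen]
      have hcong : (List.range pvSeqData.length).filter (fun i => (pvCounts items)[i]? == some ((q : Int)))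
          = (List.range pvSeqData.length).filter (fun i => pvF items i == some q) := by
        apply List.filter_congr
        intro i hir
        have hiN : i < pvSeqData.length := List.mem_range.mp hir
        rw [pv_counts_getElem? items hiN]
        cases hF : pvF items i with
        | none =>
          rw [Bool.eq_iff_iff]
          simp only [beq_iff_eq, Option.some.injEq]
          constructor
          · intro h; exfalso; omega
          · intro h; exact absurd h (by simp)
        | some k =>
          rw [Bool.eq_iff_iff]
          simp only [beq_iff_eq, Option.some.injEq]
          exact ⟨fun h => by exact_mod_cast h, fun h => by exact_mod_cast h⟩
      rw [hcong]
      show (pvDrop items q).head? = some i0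
      rw [hdrop]
      rfl
    have hq0' : ((q : Int)) > 0 := by exact_mod_cast hq0
    rw [hc] at hidx
    unfold pvArgmax
    rw [PySem.List.max?_id_cons, hmax]
    show (if ((q : Int)) > 0 then
            match PySem.List.index? (c0 :: t) ((q : Int)) with
            | some j => (PySem.List.pyGet? pvSeqData (j : Int)).bind (fun s => PySem.List.pyGet? s ((q : Int)))
            | none => none
          else none)
        = (PySem.List.pyGet? pvSeqData (((pvDrop items q).headD 0 : Nat) : Int)).bind
            (fun s => PySem.List.pyGet? s ((q : Nat) : Int))
    rw [if_pos hq0', hidx, hdrop]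
    rfl

-- ===== VERDICT (by name: the statement is the Claim_ definition above) =====
theorem next_in_longest_subsequence_spec : Claim_equal_next_in_longest_subsequence := by
  unfold Claim_equal_next_in_longest_subsequence
  intro items _
  unfold Spec_next_in_longest_subsequence
  have hA : next_in_longest_subsequence items = pvPickA (pvCounts items) := by
    unfold next_in_longest_subsequence
    have h := pvLoopA_eq_map items pvSeqData []
    simp only [List.length_nil, List.nil_append] at h
    rw [h]
    rfl
  have hB : next_in_longest_subsequence_alt items
      = match (List.range' 0 31).foldl (pvUpd items) none with
        | none => none
        | some (idx, n) =>
            (PySem.List.pyGet? pvSeqData (idx : Int)).bind (fun s => PySem.List.pyGet? s (n : Int)) := by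
    show (match pvLoopB (PySem.Set.ofList items) 32 (List.range pvSeqData.length) 0 none with
          | none => none
          | some (idx, n) =>
              (PySem.List.pyGet? pvSeqData (idx : Int)).bind (fun s => PySem.List.pyGet? s (n : Int))) = _
    have hinit : List.range pvSeqData.length
        = (List.range pvSeqData.length).filter (pvSurv items 0) := by
      rw [List.filter_eq_self.mpr]
      intro i _
      rw [pv_surv_iff]
      exact ⟨Nat.zero_le _, fun j hj _ => absurd hj (by omega)⟩
    rw [hinit, pv_loopB_eq items 32 0 none (by omega)]
  rw [hA, hB, ← pv_bridge items]
  rcases hc : pvCounts items with _ | ⟨c0, t⟩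
  · exfalso
    have : pvSeqData = [] := by simpa [pvCounts] using hc
    exact absurd this (by decide)
  · exact pv_pickA_eq_argmax c0 t
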